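-- pv_equiv track=rewrite | github.com/coolsgupta/leetcode | reduceTheNumber.py | reduceTheNumber
-- ===== SOURCE A (Python) =====
-- def reduceTheNumber(number, k):
--     if len(number) <= k:
--         return number
--
--     n = list(map(int, number))
--
--     res = ''
--     i = 0
--     while(i < len(number)):
--         res = res + str(sum(n[i:i + k]))
--         i += k
--
--     if len(res) > k:
--         res = reduceTheNumber(res, k)
--
--     return res
-- ===== SOURCE B (Python) =====
-- def reduceTheNumber(number, k):
--     while len(number) > k:
--         number = ''.join(str(sum(int(c) for c in number[i:i + k]))
--                          for i in range(0, len(number), k))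
--     return number
-- ===== Notes on version B (the rewrite author's own statement) =====
-- stated objective: simpler
-- what changed: Replaces A's recursion (with its separate base guard, index while-loop building res, and post-build recursive call) by a single iterative while-loop that rebuilds the string from k-sized slices via ''.join over range(0,len,k) until it is short enough.
import Mathlib
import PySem

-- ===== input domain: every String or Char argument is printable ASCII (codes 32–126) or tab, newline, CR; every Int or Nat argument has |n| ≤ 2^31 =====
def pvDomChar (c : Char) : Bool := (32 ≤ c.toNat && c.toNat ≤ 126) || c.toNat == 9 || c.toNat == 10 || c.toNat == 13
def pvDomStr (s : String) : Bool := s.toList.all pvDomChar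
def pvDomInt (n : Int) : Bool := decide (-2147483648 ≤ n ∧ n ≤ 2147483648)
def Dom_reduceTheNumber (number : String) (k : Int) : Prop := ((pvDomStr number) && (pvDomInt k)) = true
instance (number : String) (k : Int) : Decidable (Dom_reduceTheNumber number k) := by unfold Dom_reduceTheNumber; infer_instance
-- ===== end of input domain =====

-- B replaces A's recursion by a single iterative while-loop rebuilding the string from
-- k-slices via ''.join over range(0, len, k); same values, no speed claim.
-- Both loops carry a fuel counter as a totality guard only (Python A recurses / B loops
-- without one); inside Pre_ the fuel 10*len+1 is never exhausted.

-- int(c) for a single character c: exact on digit characters (Pre_ admits only those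
-- wherever int() is reached; on a non-digit Python raises ValueError, excluded by Pre_).
def pvIntOfDigit (c : Char) : Int := (PySem.Int.ofChars? [c]).getD 0

-- ===== PORT A =====
-- the inner 'while i < len(number): res = res + str(sum(n[i:i+k])); i += k' loop
def reduceA_build (n : List Int) (len k : Int) : Int → List Char → Nat → List Char
  | _, res, 0 => res
  | i, res, fuel + 1 =>
    if i < len then
      reduceA_build n len k (i + k)
        (res ++ PySem.Int.toChars ((PySem.List.slice n (some i) (some (i + k))).sum)) fuel
    else res

-- the recursive function (fuel = recursion-depth guard)
def reduceA_go (k : Int) : Nat → List Char → List Char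
  | 0, number => number
  | fuel + 1, number =>
    if (number.length : Int) ≤ k then number
    else
      let n := number.map pvIntOfDigit
      let res := reduceA_build n (number.length : Int) k 0 [] (number.length + 1)
      if k < (res.length : Int) then reduceA_go k fuel res else res

def reduceTheNumber (number : String) (k : Int) : String :=
  String.ofList (reduceA_go k (number.toList.length * 10 + 1) number.toList)

-- ===== PORT B =====
-- one pass of ''.join(str(sum(int(c) for c in number[i:i+k])) for i in range(0, len(number), k))
def reduceB_pass (number : List Char) (k : Int) : List Char :=
  PySem.Chars.join []
    ((PySem.List.pyRange 0 (number.length : Int) k).map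
      (fun i => PySem.Int.toChars
        (((PySem.List.slice number (some i) (some (i + k))).map pvIntOfDigit).sum)))

-- the 'while len(number) > k:' loop (fuel = iteration guard)
def reduceB_loop (k : Int) : Nat → List Char → List Char
  | 0, number => number
  | fuel + 1, number =>
    if k < (number.length : Int) then reduceB_loop k fuel (reduceB_pass number k)
    else number

def reduceTheNumber_alt (number : String) (k : Int) : String :=
  String.ofList (reduceB_loop k (number.toList.length * 10 + 1) number.toList)

-- ===== PRECONDITION & SPEC =====
-- Pre_ is exactly where Python A returns: either the immediate base case (len(number) ≤ k
-- with 0 ≤ k), or k ≥ 2 with a pure digit string.  Excluded inputs are all crashes of A: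
-- int() raises ValueError on a non-digit reached when len > k; k ≤ 0 with len > k loops
-- forever / hits RecursionError; k = 1 with len > 1 recurses forever (RecursionError).
def Pre_reduceTheNumber (number : String) (k : Int) : Prop :=
  ((number.toList.length : Int) ≤ k ∧ 0 ≤ k) ∨
  (2 ≤ k ∧ number.toList.all Char.isDigit = true)
instance (number : String) (k : Int) : Decidable (Pre_reduceTheNumber number k) := by
  unfold Pre_reduceTheNumber; infer_instance

def pvWitness_reduceTheNumber : String × Int := ("987654321", 2)

def Spec_reduceTheNumber (number : String) (k : Int) (out : String) : Prop := out = reduceTheNumber_alt number k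
instance (number : String) (k : Int) (out : String) : Decidable (Spec_reduceTheNumber number k out) := by unfold Spec_reduceTheNumber; infer_instance

-- ===== CLAIM (what is proved, stated in full; the proofs are below) =====
def Claim_equal_reduceTheNumber : Prop := ∀ (number : String) (k : Int), Dom_reduceTheNumber number k → Pre_reduceTheNumber number k → Spec_reduceTheNumber number k (reduceTheNumber number k)

-- ===== LEMMAS AND PROOFS =====

-- range(a, b, s) with 0 < s unfolds one step (cons form for a general positive step)
theorem pvPyRange_pos_cons (a b s : Int) (hs : 0 < s) (hab : a < b) :
    PySem.List.pyRange a b s = a :: PySem.List.pyRange (a + s) b s := by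
  rw [PySem.List.pyRange_of_pos _ _ hs, PySem.List.pyRange_of_pos _ _ hs]
  by_cases h : a + s < b
  · have h1 : (b - a + s - 1) / s = (b - (a + s) + s - 1) / s + 1 := by
      have : b - a + s - 1 = (b - (a + s) + s - 1) + 1 * s := by ring
      rw [this, Int.add_mul_ediv_right _ _ hs.ne']
    have h2 : 0 ≤ (b - (a + s) + s - 1) / s :=
      Int.ediv_nonneg (by omega) hs.le
    rw [if_pos hab, if_pos h, h1]
    have h3 : ((b - (a + s) + s - 1) / s + 1).toNat = ((b - (a + s) + s - 1) / s).toNat + 1 := by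
      omega
    rw [h3, List.range_succ_eq_map]
    simp only [List.map_cons, List.map_map]
    refine List.cons_eq_cons.mpr ⟨by simp, ?_⟩
    apply List.map_congr_left
    intro x _
    simp only [Function.comp_apply]
    push_cast
    ring
  · have h1 : (b - a + s - 1) / s = 1 := by
      rw [← PySem.Int.floordiv_eq_ediv_of_pos hs,
        PySem.Int.floordiv_eq_iff_of_pos hs]
      omega
    rw [if_pos hab, if_neg h, h1]
    simp

theorem pvPyRange_pos_nil (a b s : Int) (hs : 0 < s) (hab : b ≤ a) :
    PySem.List.pyRange a b s = [] := by
  rw [PySem.List.pyRange_of_pos _ _ hs, if_neg (by omega)]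
  simp

-- ''.join is flatten
theorem pvJoin_nil_eq_flatten (parts : List (List Char)) :
    PySem.Chars.join [] parts = parts.flatten := by
  simp only [PySem.Chars.join]
  induction parts with
  | nil => simp [List.intercalate]
  | cons h t ih => cases t <;> simp_all [List.intercalate, List.intersperse]

-- A's inner index loop equals the mapped range, given enough fuel
theorem pvBuild_eq (n : List Int) (len k : Int) (hk : 1 ≤ k) :
    ∀ (fuel : Nat) (i : Int) (res : List Char), 0 ≤ i → (len - i).toNat ≤ fuel →
      reduceA_build n len k i res fuel =
        res ++ ((PySem.List.pyRange i len k).map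
          (fun j => PySem.Int.toChars ((PySem.List.slice n (some j) (some (j + k))).sum))).flatten := by
  intro fuel
  induction fuel with
  | zero =>
    intro i res hi hf
    rw [reduceA_build, pvPyRange_pos_nil i len k (by omega) (by omega)]
    simp
  | succ f ih =>
    intro i res hi hf
    rw [reduceA_build]
    by_cases hil : i < len
    · rw [if_pos hil, ih (i + k) _ (by omega) (by omega),
        pvPyRange_pos_cons i len k (by omega) hil]
      simp
    · rw [if_neg hil, pvPyRange_pos_nil i len k (by omega) (by omega)]
      simp

-- slicing commutes with the int() map (nonnegative bounds)
theorem pvSlice_map (x : List Char) (a b : Int) (ha : 0 ≤ a) (hb : 0 ≤ b) :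
    PySem.List.slice (x.map pvIntOfDigit) (some a) (some b) =
      (PySem.List.slice x (some a) (some b)).map pvIntOfDigit := by
  rw [PySem.List.slice_toNat _ ha hb, PySem.List.slice_toNat _ ha hb]
  simp [List.map_take, List.map_drop]

-- one round of A's rebuilding equals B's pass
theorem pvStep_eq (x : List Char) (k : Int) (hk : 1 ≤ k) :
    reduceA_build (x.map pvIntOfDigit) (x.length : Int) k 0 [] (x.length + 1) =
      reduceB_pass x k := by
  rw [pvBuild_eq _ _ _ hk _ 0 [] le_rfl (by omega), reduceB_pass,
    pvJoin_nil_eq_flatten]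
  simp only [List.nil_append]
  congr 1
  apply List.map_congr_left
  intro j hj
  have hj0 : 0 ≤ j := by
    rcases (PySem.List.mem_pyRange_iff_of_pos (by omega : (0:Int) < k) j).1 hj with ⟨h1, -, -⟩
    omega
  rw [pvSlice_map x j (j + k) hj0 (by omega)]

-- B's loop on a short string is the identity (any fuel)
theorem pvLoopB_short (k : Int) (fuel : Nat) (x : List Char) (h : ¬ k < (x.length : Int)) :
    reduceB_loop k fuel x = x := by
  cases fuel with
  | zero => rw [reduceB_loop]
  | succ f => rw [reduceB_loop, if_neg h]

-- the main alignment: A's recursion and B's loop agree at every fuel, for positive k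
theorem pvGo_eq (k : Int) (hk : 1 ≤ k) :
    ∀ (fuel : Nat) (x : List Char), reduceA_go k fuel x = reduceB_loop k fuel x := by
  intro fuel
  induction fuel with
  | zero => intro x; rw [reduceA_go, reduceB_loop]
  | succ f ih =>
    intro x
    rw [reduceA_go, reduceB_loop]
    by_cases hlen : (x.length : Int) ≤ k
    · rw [if_pos hlen, if_neg (by omega)]
    · have hc : k < ((x.length : Int)) := by omega
      rw [if_neg hlen, if_pos hc]
      simp only [pvStep_eq x k hk]
      by_cases hres : k < ((reduceB_pass x k).length : Int)
      · rw [if_pos hres, ih]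
      · rw [if_neg hres, pvLoopB_short k f (reduceB_pass x k) hres]

-- ===== VERDICT (by name: the statement is the Claim_ definition above) =====
theorem reduceTheNumber_spec : Claim_equal_reduceTheNumber := by
  intro number k _hdom hpre
  unfold Spec_reduceTheNumber reduceTheNumber reduceTheNumber_alt
  rcases hpre with ⟨hlen, _hk0⟩ | ⟨hk2, _hdig⟩
  · rw [reduceA_go, reduceB_loop, if_pos hlen, if_neg (by omega)]
  · rw [pvGo_eq k (by omega)]
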